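-- pv_equiv track=rewrite | github.com/STAR-Laboratory/PRAC_TC_ISCA25 | TPRAC/champsim-ramulator2/champsim/configurations/ramulator2_configs/calc_rh_parameters.py | get_bat_parameters
-- ===== SOURCE A (Python) =====
-- def get_bat_parameters(tRH):
--     nrh_nbo_pairs = [
--         (128, 12),
--         (256, 21),
--         (512, 49),
--         (1024, 110),
--         (2048, 244),
--         (4096, 544),
--     ]
--     for nrh, NBO in nrh_nbo_pairs:
--         if tRH <= nrh:
--             return NBO
--     return 32
-- ===== SOURCE B (Python) =====
-- _THRESHOLDS = [128, 256, 512, 1024, 2048, 4096]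
-- _NBOS = [12, 21, 49, 110, 244, 544]
--
-- def get_bat_parameters(tRH):
--     # binary search: first index with tRH <= _THRESHOLDS[idx] (bisect_left)
--     lo, hi = 0, len(_THRESHOLDS)
--     while lo < hi:
--         mid = (lo + hi) // 2
--         if _THRESHOLDS[mid] < tRH:
--             lo = mid + 1
--         else:
--             hi = mid
--     return _NBOS[lo] if lo < len(_NBOS) else 32
-- ===== Notes on version B (the rewrite author's own statement) =====
-- stated objective: alternative
-- what changed: Replaces A's sequential first-match scan over (threshold,NBO) pairs with a binary search (bisect_left) over a sorted thresholds list indexing a parallel NBO table, with 32 as the past-the-end default.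
import Mathlib
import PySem

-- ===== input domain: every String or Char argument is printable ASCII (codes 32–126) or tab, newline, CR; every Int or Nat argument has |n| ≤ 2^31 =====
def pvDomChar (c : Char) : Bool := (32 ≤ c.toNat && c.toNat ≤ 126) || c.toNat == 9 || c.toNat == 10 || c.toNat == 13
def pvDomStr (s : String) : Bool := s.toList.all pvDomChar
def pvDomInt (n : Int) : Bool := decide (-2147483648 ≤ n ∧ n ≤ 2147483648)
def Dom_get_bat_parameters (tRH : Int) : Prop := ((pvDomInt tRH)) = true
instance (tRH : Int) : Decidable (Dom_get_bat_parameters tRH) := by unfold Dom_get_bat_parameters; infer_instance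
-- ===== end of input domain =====

-- B replaces A's sequential first-match scan with a binary search over a sorted threshold table (alternative decomposition, same results).

-- ===== PORT A =====
-- the for-loop with early return, as structural recursion over the pair list
def batScan (tRH : Int) : List (Int × Int) → Int
  | [] => 32
  | (nrh, nbo) :: rest => if tRH ≤ nrh then nbo else batScan tRH rest

def get_bat_parameters (tRH : Int) : Int :=
  batScan tRH [(128, 12), (256, 21), (512, 49), (1024, 110), (2048, 244), (4096, 544)]

-- ===== PORT B =====
def batThresholds : List Int := [128, 256, 512, 1024, 2048, 4096]
def batNbos : List Int := [12, 21, 49, 110, 244, 544]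

-- the while-loop of Source B, recursing on hi - lo
def batBisect (tRH : Int) (lo hi : Nat) : Nat :=
  if lo < hi then
    let mid := (lo + hi) / 2
    if batThresholds.getD mid 0 < tRH then batBisect tRH (mid + 1) hi
    else batBisect tRH lo mid
  else lo
termination_by hi - lo
decreasing_by all_goals omega

def get_bat_parameters_alt (tRH : Int) : Int :=
  let lo := batBisect tRH 0 batThresholds.length
  if lo < batNbos.length then batNbos.getD lo 0 else 32

-- ===== PRECONDITION & SPEC =====
def Spec_get_bat_parameters (tRH : Int) (out : Int) : Prop := out = get_bat_parameters_alt tRH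
instance (tRH : Int) (out : Int) : Decidable (Spec_get_bat_parameters tRH out) := by unfold Spec_get_bat_parameters; infer_instance

-- ===== CLAIM (what is proved, stated in full; the proofs are below) =====
def Claim_equal_get_bat_parameters : Prop := ∀ (tRH : Int), Dom_get_bat_parameters tRH → Spec_get_bat_parameters tRH (get_bat_parameters tRH)

-- ===== LEMMAS AND PROOFS =====

-- evaluate both programs under a full case split on tRH's bucket
lemma bat_equal (tRH : Int) : get_bat_parameters tRH = get_bat_parameters_alt tRH := by
  simp [get_bat_parameters, get_bat_parameters_alt, batScan, batBisect, batThresholds, batNbos]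
  split_ifs <;> simp_all <;> omega

-- ===== VERDICT (by name: the statement is the Claim_ definition above) =====
theorem get_bat_parameters_spec : Claim_equal_get_bat_parameters := by
  intro tRH _
  exact bat_equal tRH
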